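-- pv_equiv track=rewrite | github.com/Tofuu88/Dennis-Chen-Practice | Text_generator_Trigram_BiGram_12_24_2020.py | Markov_bigram
-- ===== SOURCE A (Python) =====
-- def Markov_bigram(bigram: list, inp: str) -> dict:
--     head_dict = {}
--     head_dict[inp] = {"placeholder": 0}
--
--
--     for j in range(len(bigram)):  # for each head, subsequent tokens are checked
--         head_check = bigram[j].split()[0]
--         tail_check = bigram[j].split()[1]
--         if head_check == inp:
--             if tail_check not in head_dict[head_check]:
--                 head_dict[head_check][tail_check] = 1
--             elif tail_check in head_dict[head_check]:
--                 head_dict[head_check][tail_check] += 1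
--
--     del head_dict[inp]["placeholder"]
--     return head_dict
-- ===== SOURCE B (Python) =====
-- def Markov_bigram(bigram: list, inp: str) -> dict:
--     # Build the full head -> {tail: count} index in one pass, then select the queried head.
--     index = {}
--     for entry in bigram:
--         tokens = entry.split()
--         head = tokens[0]
--         tail = tokens[1]
--         inner = index.get(head, {})
--         inner[tail] = inner.get(tail, 0) + 1
--         index[head] = inner
--     return {inp: index.get(inp, {})}
-- ===== Notes on version B (the rewrite author's own statement) =====
-- stated objective: alternative
-- what changed: B builds a full head->Counter index over all bigrams in one pass (no placeholder sentinel, no per-query filter) and then selects the queried head, instead of A's filter-by-inp-inside-the-loop with a sentinel key inserted and deleted.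
-- intended difference: On inputs where some bigram's head equals inp and its second token is the literal string 'placeholder', A silently drops that tail's count (its sentinel key is deleted at the end, e.g. A(['a placeholder'],'a') = {'a': {}}), while B counts it normally ({'a': {'placeholder': 1}}), which is the intended count. — e.g. on Markov_bigram(["a placeholder"], "a"): A returns [("a", [])], B returns [("a", [("placeholder", 1)])]
import Mathlib
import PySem

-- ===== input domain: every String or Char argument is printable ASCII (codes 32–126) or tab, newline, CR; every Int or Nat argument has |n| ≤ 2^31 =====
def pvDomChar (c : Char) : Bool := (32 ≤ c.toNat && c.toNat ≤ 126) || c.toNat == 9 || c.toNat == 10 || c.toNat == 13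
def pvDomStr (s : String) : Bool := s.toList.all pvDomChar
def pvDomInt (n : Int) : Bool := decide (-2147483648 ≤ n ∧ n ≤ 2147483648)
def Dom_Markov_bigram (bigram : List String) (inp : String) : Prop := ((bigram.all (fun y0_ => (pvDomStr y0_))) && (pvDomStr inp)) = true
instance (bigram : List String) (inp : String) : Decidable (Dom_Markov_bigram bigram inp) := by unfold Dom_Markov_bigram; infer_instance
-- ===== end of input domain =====

-- B builds the full head -> tail-count index in one pass and then selects the queried
-- head, instead of A's filter-by-inp-inside-the-loop with a "placeholder" sentinel key.

-- ===== PORT A =====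
-- loop body of A: head_check/tail_check via .split() (computed twice, as in the source);
-- head_dict[head_check] is ported as getD with default Dict.empty — faithful because the
-- lookup only happens in the branch where head_check == inp, which is always a key.
def stepA (inp : String) (hd : PySem.Dict String (PySem.Dict String Int)) (s : String) :
    PySem.Dict String (PySem.Dict String Int) :=
  let head_check := PySem.List.pyGetD (PySem.Str.split₀ s) 0 ""
  let tail_check := PySem.List.pyGetD (PySem.Str.split₀ s) 1 ""
  if head_check == inp then
    if !(PySem.Dict.contains (PySem.Dict.getD hd head_check PySem.Dict.empty) tail_check) then
      PySem.Dict.insert hd head_check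
        (PySem.Dict.insert (PySem.Dict.getD hd head_check PySem.Dict.empty) tail_check 1)
    else
      PySem.Dict.insert hd head_check
        (PySem.Dict.modify (PySem.Dict.getD hd head_check PySem.Dict.empty) tail_check 0 (· + 1))
  else hd

def Markov_bigram (bigram : List String) (inp : String) : List (String × List (String × Int)) :=
  -- head_dict = {}; head_dict[inp] = {"placeholder": 0}
  let hd0 : PySem.Dict String (PySem.Dict String Int) :=
    PySem.Dict.insert PySem.Dict.empty inp
      (PySem.Dict.insert PySem.Dict.empty "placeholder" (0 : Int))
  -- for j in range(len(bigram)): ...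
  let hd := (PySem.List.pyRange 0 (PySem.List.len bigram) 1).foldl
      (fun hd j => stepA inp hd (PySem.List.pyGetD bigram j "")) hd0
  -- del head_dict[inp]["placeholder"]
  let hd2 := PySem.Dict.insert hd inp
      (PySem.Dict.erase (PySem.Dict.getD hd inp PySem.Dict.empty) "placeholder")
  hd2.items.map (fun p => (p.1, p.2.items))

-- ===== PORT B =====
def stepB (idx : PySem.Dict String (PySem.Dict String Int)) (entry : String) :
    PySem.Dict String (PySem.Dict String Int) :=
  let tokens := PySem.Str.split₀ entry
  let head := PySem.List.pyGetD tokens 0 ""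
  let tail := PySem.List.pyGetD tokens 1 ""
  let inner := PySem.Dict.getD idx head PySem.Dict.empty
  PySem.Dict.insert idx head
    (PySem.Dict.insert inner tail (PySem.Dict.getD inner tail 0 + 1))

def Markov_bigram_alt (bigram : List String) (inp : String) : List (String × List (String × Int)) :=
  let index := bigram.foldl stepB PySem.Dict.empty
  [(inp, (PySem.Dict.getD index inp PySem.Dict.empty).items)]

-- ===== PRECONDITION & SPEC =====
-- Pre_ excludes exactly the inputs where Python A (and B) raise IndexError:
-- some bigram entry with fewer than two whitespace-separated tokens.
def Pre_Markov_bigram (bigram : List String) (inp : String) : Prop :=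
  ∀ s ∈ bigram, 2 ≤ (PySem.Str.split₀ s).length
instance (bigram : List String) (inp : String) : Decidable (Pre_Markov_bigram bigram inp) := by
  unfold Pre_Markov_bigram; infer_instance
def pvWitness_Markov_bigram : List String × String := (["a b", "a c", "x y"], "a")

-- On inputs where some bigram's head equals inp and its second token is the literal string
-- "placeholder", A silently drops that tail's count (its sentinel key is deleted at the end),
-- while B counts "placeholder" like any other tail, which is the intended count.
def D_Markov_bigram (bigram : List String) (inp : String) : Prop :=
  ∃ s ∈ bigram, PySem.List.pyGetD (PySem.Str.split₀ s) 0 "" = inp ∧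
    PySem.List.pyGetD (PySem.Str.split₀ s) 1 "" = "placeholder"
instance (bigram : List String) (inp : String) : Decidable (D_Markov_bigram bigram inp) := by
  unfold D_Markov_bigram; infer_instance

def Spec_Markov_bigram (bigram : List String) (inp : String) (out : List (String × List (String × Int))) : Prop := ¬ D_Markov_bigram bigram inp → out = Markov_bigram_alt bigram inp
instance (bigram : List String) (inp : String) (out : List (String × List (String × Int))) : Decidable (Spec_Markov_bigram bigram inp out) := by unfold Spec_Markov_bigram; infer_instance

def pvDiffWitness_Markov_bigram : List String × String := (["a placeholder"], "a")
def pvDiffWitnessOut_Markov_bigram :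
    (List (String × List (String × Int))) × (List (String × List (String × Int))) :=
  ([("a", [])], [("a", [("placeholder", 1)])])

-- ===== CLAIM (what is proved, stated in full; the proofs are below) =====
def Claim_unchanged_Markov_bigram : Prop := ∀ (bigram : List String) (inp : String), Dom_Markov_bigram bigram inp → Pre_Markov_bigram bigram inp → Spec_Markov_bigram bigram inp (Markov_bigram bigram inp)
def Claim_changed_Markov_bigram : Prop := Dom_Markov_bigram (pvDiffWitness_Markov_bigram.1) (pvDiffWitness_Markov_bigram.2) ∧ Pre_Markov_bigram (pvDiffWitness_Markov_bigram.1) (pvDiffWitness_Markov_bigram.2) ∧ D_Markov_bigram (pvDiffWitness_Markov_bigram.1) (pvDiffWitness_Markov_bigram.2) ∧ Markov_bigram (pvDiffWitness_Markov_bigram.1) (pvDiffWitness_Markov_bigram.2) = pvDiffWitnessOut_Markov_bigram.1 ∧ Markov_bigram_alt (pvDiffWitness_Markov_bigram.1) (pvDiffWitness_Markov_bigram.2) = pvDiffWitnessOut_Markov_bigram.2 ∧ pvDiffWitnessOut_Markov_bigram.1 ≠ pvDiffWitnessOut_Markov_bigram.2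
def Claim_exact_Markov_bigram : Prop := ∀ (bigram : List String) (inp : String), Dom_Markov_bigram bigram inp → Pre_Markov_bigram bigram inp → D_Markov_bigram bigram inp → Markov_bigram bigram inp ≠ Markov_bigram_alt bigram inp

-- ===== LEMMAS AND PROOFS =====

-- the common inner step: what one bigram entry does to inp's tail-count dict
def stepI (inp : String) (d : PySem.Dict String Int) (s : String) : PySem.Dict String Int :=
  if PySem.List.pyGetD (PySem.Str.split₀ s) 0 "" == inp then
    PySem.Dict.insert d (PySem.List.pyGetD (PySem.Str.split₀ s) 1 "")
      (PySem.Dict.getD d (PySem.List.pyGetD (PySem.Str.split₀ s) 1 "") 0 + 1)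
  else d

theorem stepA_single (inp : String) (d : PySem.Dict String Int) (s : String) :
    stepA inp (PySem.Dict.insert PySem.Dict.empty inp d) s =
      PySem.Dict.insert PySem.Dict.empty inp (stepI inp d s) := by
  by_cases hh : (PySem.List.pyGetD (PySem.Str.split₀ s) 0 "" == inp) = true
  · have he : PySem.List.pyGetD (PySem.Str.split₀ s) 0 "" = inp := eq_of_beq hh
    by_cases hc : (PySem.Dict.contains d (PySem.List.pyGetD (PySem.Str.split₀ s) 1 "")) = true
    · simp [stepA, stepI, he, hc, PySem.Dict.getD_insert_self, PySem.Dict.modify,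
        PySem.Dict.insert_insert_self]
    · simp only [Bool.not_eq_true] at hc
      simp [stepA, stepI, he, hc, PySem.Dict.getD_insert_self,
        PySem.Dict.getD_of_not_contains d (0:Int) hc, PySem.Dict.insert_insert_self]
  · simp [stepA, stepI, hh]

theorem stepB_getD (inp : String) (idx : PySem.Dict String (PySem.Dict String Int)) (s : String) :
    PySem.Dict.getD (stepB idx s) inp PySem.Dict.empty =
      stepI inp (PySem.Dict.getD idx inp PySem.Dict.empty) s := by
  by_cases hh : inp = PySem.List.pyGetD (PySem.Str.split₀ s) 0 ""
  · simp [stepB, stepI, ← hh]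
  · have hb : (PySem.List.pyGetD (PySem.Str.split₀ s) 0 "" == inp) = false := by
      simp [Ne.symm hh]
    simp [stepB, stepI, PySem.Dict.getD_insert, hh, hb]

theorem foldA_single (inp : String) (l : List String) (d : PySem.Dict String Int) :
    l.foldl (stepA inp) (PySem.Dict.insert PySem.Dict.empty inp d) =
      PySem.Dict.insert PySem.Dict.empty inp (l.foldl (stepI inp) d) := by
  induction l generalizing d with
  | nil => rfl
  | cons s t ih => simp [List.foldl, stepA_single, ih]

theorem foldB_getD (inp : String) (l : List String)
    (idx : PySem.Dict String (PySem.Dict String Int)) :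
    PySem.Dict.getD (l.foldl stepB idx) inp PySem.Dict.empty =
      l.foldl (stepI inp) (PySem.Dict.getD idx inp PySem.Dict.empty) := by
  induction l generalizing idx with
  | nil => rfl
  | cons s t ih => simp [List.foldl, ih, stepB_getD]

theorem stepI_ph (inp : String) (d : PySem.Dict String Int) (s : String)
    (hs : ¬ (PySem.List.pyGetD (PySem.Str.split₀ s) 0 "" = inp ∧
      PySem.List.pyGetD (PySem.Str.split₀ s) 1 "" = "placeholder")) :
    stepI inp (PySem.Dict.mk (("placeholder", (0:Int)) :: d.items)) s =
      PySem.Dict.mk (("placeholder", (0:Int)) :: (stepI inp d s).items) := by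
  by_cases hh : (PySem.List.pyGetD (PySem.Str.split₀ s) 0 "" == inp) = true
  · have ht : PySem.List.pyGetD (PySem.Str.split₀ s) 1 "" ≠ "placeholder" := by
      intro hcon; exact hs ⟨eq_of_beq hh, hcon⟩
    have hbt : ("placeholder" == PySem.List.pyGetD (PySem.Str.split₀ s) 1 "") = false := by
      simp [Ne.symm ht]
    simp only [stepI, hh, if_true]
    have hgd : PySem.Dict.getD (PySem.Dict.mk (("placeholder", (0:Int)) :: d.items))
        (PySem.List.pyGetD (PySem.Str.split₀ s) 1 "") 0 =
        PySem.Dict.getD d (PySem.List.pyGetD (PySem.Str.split₀ s) 1 "") 0 := by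
      simp [PySem.Dict.getD, PySem.Dict.get?, List.find?, hbt]
    rw [hgd]
    have hct : PySem.Dict.contains (PySem.Dict.mk (("placeholder", (0:Int)) :: d.items))
        (PySem.List.pyGetD (PySem.Str.split₀ s) 1 "") =
        PySem.Dict.contains d (PySem.List.pyGetD (PySem.Str.split₀ s) 1 "") := by
      simp [PySem.Dict.contains, hbt]
    apply PySem.Dict.ext
    simp [PySem.Dict.items_insert, hct]
    by_cases hc : PySem.Dict.contains d (PySem.List.pyGetD (PySem.Str.split₀ s) 1 "") = true
    · simp [hc]
      exact fun h => absurd h.symm ht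
    · simp only [Bool.not_eq_true] at hc
      simp [hc]
  · simp [stepI, hh]

theorem foldI_ph (inp : String) (l : List String) (d : PySem.Dict String Int)
    (hl : ∀ s ∈ l, ¬ (PySem.List.pyGetD (PySem.Str.split₀ s) 0 "" = inp ∧
      PySem.List.pyGetD (PySem.Str.split₀ s) 1 "" = "placeholder")) :
    l.foldl (stepI inp) (PySem.Dict.mk (("placeholder", (0:Int)) :: d.items)) =
      PySem.Dict.mk (("placeholder", (0:Int)) :: (l.foldl (stepI inp) d).items) := by
  induction l generalizing d with
  | nil => rfl
  | cons s t ih =>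
    simp only [List.foldl]
    rw [stepI_ph inp d s (hl s (by simp)), ih (stepI inp d s) (fun x hx => hl x (by simp [hx]))]

theorem keys_foldI (inp : String) (l : List String) (d : PySem.Dict String Int)
    (hph : "placeholder" ∉ d.keys)
    (hl : ∀ s ∈ l, ¬ (PySem.List.pyGetD (PySem.Str.split₀ s) 0 "" = inp ∧
      PySem.List.pyGetD (PySem.Str.split₀ s) 1 "" = "placeholder")) :
    "placeholder" ∉ (l.foldl (stepI inp) d).keys := by
  induction l generalizing d with
  | nil => exact hph
  | cons s t ih =>
    refine ih (stepI inp d s) ?_ (fun x hx => hl x (by simp [hx]))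
    by_cases hh : (PySem.List.pyGetD (PySem.Str.split₀ s) 0 "" == inp) = true
    · have ht : "placeholder" ≠ PySem.List.pyGetD (PySem.Str.split₀ s) 1 "" := by
        intro hcon; exact hl s (by simp) ⟨eq_of_beq hh, hcon.symm⟩
      simp only [stepI, hh, if_true]
      rw [PySem.Dict.mem_keys_insert]
      rintro (h | h)
      · exact ht h
      · exact hph h
    · simpa [stepI, hh] using hph

theorem erase_ph (d : PySem.Dict String Int) (hph : "placeholder" ∉ d.keys) :
    PySem.Dict.erase (PySem.Dict.mk (("placeholder", (0:Int)) :: d.items)) "placeholder" = d := by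
  apply PySem.Dict.ext
  simp only [PySem.Dict.erase, List.filter]
  simp only [beq_self_eq_true, Bool.not_true]
  refine List.filter_eq_self.mpr ?_
  intro p hp
  have : p.1 ≠ "placeholder" := by
    intro hcon
    exact hph (by simp [PySem.Dict.keys]; exact ⟨p.2, by rw [← hcon]; simpa using hp⟩)
  simp [this]

theorem items_single (inp : String) (X : PySem.Dict String Int) :
    (PySem.Dict.insert PySem.Dict.empty inp X).items = [(inp, X)] := by
  simp [PySem.Dict.items_insert, PySem.Dict.empty]

-- closed forms of the two ports
theorem A_closed (bigram : List String) (inp : String) :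
    Markov_bigram bigram inp =
      [(inp, (PySem.Dict.erase
        (bigram.foldl (stepI inp) (PySem.Dict.insert PySem.Dict.empty "placeholder" (0:Int)))
        "placeholder").items)] := by
  unfold Markov_bigram
  dsimp only
  rw [PySem.List.foldl_pyRange_pyGetD bigram "" (stepA inp) _ (by norm_num)]
  simp only [List.drop_zero, Int.toNat_zero]
  rw [foldA_single inp bigram _, PySem.Dict.getD_insert_self, PySem.Dict.insert_insert_self,
    items_single]
  simp

theorem B_closed (bigram : List String) (inp : String) :
    Markov_bigram_alt bigram inp =
      [(inp, (bigram.foldl (stepI inp) PySem.Dict.empty).items)] := by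
  unfold Markov_bigram_alt
  dsimp only
  rw [foldB_getD]
  simp [PySem.Dict.getD_empty]

theorem keys_foldI_mem (inp : String) (l : List String) (d : PySem.Dict String Int)
    (h : (∃ s ∈ l, PySem.List.pyGetD (PySem.Str.split₀ s) 0 "" = inp ∧
        PySem.List.pyGetD (PySem.Str.split₀ s) 1 "" = "placeholder") ∨ "placeholder" ∈ d.keys) :
    "placeholder" ∈ (l.foldl (stepI inp) d).keys := by
  induction l generalizing d with
  | nil => simpa using h.resolve_left (by simp)
  | cons s t ih =>
    rcases h with ⟨x, hx, hp⟩ | hd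
    · rcases List.mem_cons.mp hx with rfl | hx
      · refine ih (stepI inp d x) (Or.inr ?_)
        simp only [stepI, hp.1, beq_self_eq_true, if_true, hp.2]
        rw [PySem.Dict.mem_keys_insert]
        exact Or.inl rfl
      · exact ih _ (Or.inl ⟨x, hx, hp⟩)
    · refine ih (stepI inp d s) (Or.inr ?_)
      by_cases hh : (PySem.List.pyGetD (PySem.Str.split₀ s) 0 "" == inp) = true
      · simp only [stepI, hh, if_true]
        rw [PySem.Dict.mem_keys_insert]
        exact Or.inr hd
      · simpa [stepI, hh] using hd

-- ===== VERDICT (by name: the statement is the Claim_ definition above) =====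
theorem Markov_bigram_spec : Claim_unchanged_Markov_bigram := by
  intro bigram inp _ _ hD
  rw [A_closed, B_closed]
  have hD' : ∀ s ∈ bigram, ¬ (PySem.List.pyGetD (PySem.Str.split₀ s) 0 "" = inp ∧
      PySem.List.pyGetD (PySem.Str.split₀ s) 1 "" = "placeholder") :=
    fun s hs hp => hD ⟨s, hs, hp⟩
  have h0 : (PySem.Dict.insert PySem.Dict.empty "placeholder" (0:Int)) =
      PySem.Dict.mk (("placeholder", (0:Int)) :: (PySem.Dict.empty : PySem.Dict String Int).items) := rfl
  rw [h0, foldI_ph inp bigram _ hD', erase_ph _ (keys_foldI inp bigram _ (by simp [PySem.Dict.keys, PySem.Dict.empty]) hD')]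

theorem Markov_bigram_changed : Claim_changed_Markov_bigram := by
  unfold Claim_changed_Markov_bigram; decide

theorem Markov_bigram_tight : Claim_exact_Markov_bigram := by
  intro bigram inp _ _ hD heq
  rw [A_closed, B_closed] at heq
  have h2 := List.head_eq_of_cons_eq heq
  have hLB : "placeholder" ∈ (bigram.foldl (stepI inp) PySem.Dict.empty).keys :=
    keys_foldI_mem inp bigram _ (Or.inl hD)
  have hLA : "placeholder" ∉ (PySem.Dict.erase
      (bigram.foldl (stepI inp) (PySem.Dict.insert PySem.Dict.empty "placeholder" (0:Int)))
      "placeholder").keys := by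
    simp [PySem.Dict.erase, PySem.Dict.keys, List.mem_filter]
  apply hLA
  have : ((PySem.Dict.erase
      (bigram.foldl (stepI inp) (PySem.Dict.insert PySem.Dict.empty "placeholder" (0:Int)))
      "placeholder").items) = (bigram.foldl (stepI inp) PySem.Dict.empty).items := by
    exact congrArg Prod.snd h2
  simp [PySem.Dict.keys, this]
  simpa [PySem.Dict.keys] using hLB
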